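-- pv_equiv track=rewrite | github.com/devseth34/sally-sells-experiment | backend/voice_agent/cds_rollup.py | _deepest_phase
-- ===== SOURCE A (Python) =====
-- from typing import Any
--
-- PHASE_ORDER = [
--     "CONNECTION",
--     "SITUATION",
--     "PROBLEM_AWARENESS",
--     "SOLUTION_AWARENESS",
--     "CONSEQUENCE",
--     "OWNERSHIP",
--     "COMMITMENT",
--     "TERMINATED",
-- ]
--
-- def _deepest_phase(rows: list[dict[str, Any]]) -> str | None:
--     """Deepest NEPQ phase by PHASE_ORDER index. Unknown phases ignored."""
--     best_idx = -1
--     best_name: str | None = None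
--     for r in rows:
--         p = r.get("phase")
--         if p in PHASE_ORDER:
--             idx = PHASE_ORDER.index(p)
--             if idx > best_idx:
--                 best_idx = idx
--                 best_name = p
--     return best_name
-- ===== SOURCE B (Python) =====
-- from typing import Any
--
-- PHASE_ORDER = [
--     "CONNECTION",
--     "SITUATION",
--     "PROBLEM_AWARENESS",
--     "SOLUTION_AWARENESS",
--     "CONSEQUENCE",
--     "OWNERSHIP",
--     "COMMITMENT",
--     "TERMINATED",
-- ]
--
-- def _deepest_phase(rows: list[dict[str, Any]]) -> str | None:
--     """Deepest NEPQ phase by PHASE_ORDER index. Unknown phases ignored."""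
--     present = {r.get("phase") for r in rows}
--     for p in reversed(PHASE_ORDER):
--         if p in present:
--             return p
--     return None
-- ===== Notes on version B (the rewrite author's own statement) =====
-- stated objective: simpler
-- what changed: Instead of scanning rows while tracking a running best index (with repeated list membership tests and .index scans), B collects the set of phases present in one pass and then walks the constant PHASE_ORDER list deepest-first, returning the first phase present.
import Mathlib
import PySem

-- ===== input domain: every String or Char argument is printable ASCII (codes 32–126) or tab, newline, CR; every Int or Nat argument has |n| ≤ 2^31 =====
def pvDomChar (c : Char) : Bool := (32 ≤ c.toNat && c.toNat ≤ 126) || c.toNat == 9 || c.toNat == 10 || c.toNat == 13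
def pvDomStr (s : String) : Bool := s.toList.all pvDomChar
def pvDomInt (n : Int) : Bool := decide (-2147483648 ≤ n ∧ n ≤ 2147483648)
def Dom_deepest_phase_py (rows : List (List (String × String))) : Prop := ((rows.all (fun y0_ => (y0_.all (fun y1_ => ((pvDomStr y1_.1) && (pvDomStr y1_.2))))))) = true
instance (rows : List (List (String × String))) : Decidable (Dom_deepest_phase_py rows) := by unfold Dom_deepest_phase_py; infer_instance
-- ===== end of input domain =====

-- B replaces A's row scan with a running best index by a one-pass "phases present" set
-- followed by a deepest-first walk over the constant PHASE_ORDER list (objective: simpler).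

def PHASE_ORDER : List String :=
  ["CONNECTION", "SITUATION", "PROBLEM_AWARENESS", "SOLUTION_AWARENESS",
   "CONSEQUENCE", "OWNERSHIP", "COMMITMENT", "TERMINATED"]

-- ===== PORT A =====
-- Loop over rows keeping (best_idx, best_name).  'p in PHASE_ORDER' with p = None is False,
-- hence the none-branch keeps the accumulator.  Under the contains-guard PHASE_ORDER.index(p)
-- always succeeds, so '.getD 0' is exact (the default is unreachable).
-- loop body of A, named so the fold can be reasoned about
def pvStepA (acc : Int × Option String) (r : List (String × String)) : Int × Option String :=
  match PySem.Dict.get? (PySem.Dict.mk r) "phase" with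
  | none => acc
  | some p =>
    if PHASE_ORDER.contains p then
      let idx : Int := ((PySem.List.index? PHASE_ORDER p).getD 0 : Nat)
      if idx > acc.1 then (idx, some p) else acc
    else acc

def deepest_phase_py (rows : List (List (String × String))) : Option String :=
  (rows.foldl pvStepA ((-1 : Int), (none : Option String))).2

-- ===== PORT B =====
-- present = {r.get("phase") for r in rows}; then first phase of reversed(PHASE_ORDER) in present.
def deepest_phase_py_alt (rows : List (List (String × String))) : Option String :=
  let present : PySem.Set (Option String) :=
    PySem.Set.ofList (rows.map (fun r => PySem.Dict.get? (PySem.Dict.mk r) "phase"))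
  PHASE_ORDER.reverse.find? (fun p => PySem.Set.contains present (some p))

-- ===== PRECONDITION & SPEC =====
def Spec_deepest_phase_py (rows : List (List (String × String))) (out : Option String) : Prop := out = deepest_phase_py_alt rows
instance (rows : List (List (String × String))) (out : Option String) : Decidable (Spec_deepest_phase_py rows out) := by unfold Spec_deepest_phase_py; infer_instance

-- ===== CLAIM (what is proved, stated in full; the proofs are below) =====
def Claim_equal_deepest_phase_py : Prop := ∀ (rows : List (List (String × String))), Dom_deepest_phase_py rows → Spec_deepest_phase_py rows (deepest_phase_py rows)

-- ===== LEMMAS AND PROOFS =====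

-- The phase index contributed by one row (-1 when absent/unknown).
def pvJ (r : List (String × String)) : Int :=
  match PySem.Dict.get? (PySem.Dict.mk r) "phase" with
  | none => -1
  | some p =>
    match PySem.List.index? PHASE_ORDER p with
    | none => -1
    | some k => (k : Int)

-- The maximal phase index over all rows (-1 when none).
def pvM (rows : List (List (String × String))) : Int :=
  rows.foldl (fun a r => max a (pvJ r)) (-1)

-- The phase name at index i (none for i = -1).
def pvName (i : Int) : Option String :=
  if i < 0 then none else PHASE_ORDER[i.toNat]?

theorem pvJ_ub (r : List (String × String)) : pvJ r ≤ 7 := by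
  unfold pvJ
  cases hg : PySem.Dict.get? (PySem.Dict.mk r) "phase" with
  | none => simp
  | some p =>
    cases hi : PySem.List.index? PHASE_ORDER p with
    | none =>
      have hi' : List.idxOf? p PHASE_ORDER = none := by simpa using hi
      simp [hi']
    | some k =>
      have hi' : List.idxOf? p PHASE_ORDER = some k := by simpa using hi
      obtain ⟨hk, -, -⟩ := PySem.List.getElem_of_index?_eq_some hi
      have hlen : PHASE_ORDER.length = 8 := by decide
      simp [hi']
      omega

theorem foldl_max_init (l : List (List (String × String))) (a b : Int) (h : a ≤ b) :
    a ≤ l.foldl (fun x r => max x (pvJ r)) b := by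
  induction l generalizing b with
  | nil => simpa using h
  | cons x t ih => exact ih _ (le_trans h (le_max_left _ _))

theorem pvM_bounds (rows : List (List (String × String))) :
    -1 ≤ pvM rows ∧ pvM rows ≤ 7 := by
  unfold pvM
  have : ∀ (l : List (List (String × String))) (a : Int), -1 ≤ a → a ≤ 7 →
      -1 ≤ l.foldl (fun a r => max a (pvJ r)) a ∧ l.foldl (fun a r => max a (pvJ r)) a ≤ 7 := by
    intro l
    induction l with
    | nil => intro a h1 h2; simpa using ⟨h1, h2⟩
    | cons r t ih =>
      intro a h1 h2
      simp only [List.foldl_cons]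
      exact ih _ (le_max_of_le_left h1) (max_le h2 (pvJ_ub r))
  exact this rows (-1) (by norm_num) (by norm_num)

theorem pvM_ge (rows : List (List (String × String))) (r : List (String × String))
    (hr : r ∈ rows) : pvJ r ≤ pvM rows := by
  unfold pvM
  have : ∀ (l : List (List (String × String))) (a : Int), r ∈ l →
      pvJ r ≤ l.foldl (fun a r => max a (pvJ r)) a := by
    intro l
    induction l with
    | nil => intro a h; simp at h
    | cons x t ih =>
      intro a h
      simp only [List.foldl_cons]
      rcases List.mem_cons.mp h with h | h
      · subst h
        exact foldl_max_init t _ _ (le_max_right _ _)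
      · exact ih _ h
  exact this rows (-1) hr

theorem pvM_achieved (rows : List (List (String × String))) :
    pvM rows = -1 ∨ ∃ r ∈ rows, pvJ r = pvM rows := by
  unfold pvM
  have : ∀ (l : List (List (String × String))) (a : Int),
      l.foldl (fun a r => max a (pvJ r)) a = a ∨
      ∃ r ∈ l, pvJ r = l.foldl (fun a r => max a (pvJ r)) a := by
    intro l
    induction l with
    | nil => intro a; left; rfl
    | cons x t ih =>
      intro a
      simp only [List.foldl_cons]
      rcases ih (max a (pvJ x)) with h | ⟨r, hr, he⟩
      · rw [h]
        by_cases hle : pvJ x ≤ a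
        · left; exact max_eq_left hle
        · right; exact ⟨x, by simp, (max_eq_right (by omega)).symm⟩
      · right; exact ⟨r, by simp [hr], he⟩
  exact this rows (-1)

-- ---- A-side characterisation ----

theorem stepA (r : List (String × String)) (i : Int) (hi : -1 ≤ i) :
    pvStepA (i, pvName i) r = (max i (pvJ r), pvName (max i (pvJ r))) := by
  unfold pvStepA pvJ
  cases hg : PySem.Dict.get? (PySem.Dict.mk r) "phase" with
  | none => simp [max_eq_left (show (-1 : Int) ≤ i by omega)]
  | some p =>
    by_cases hc : PHASE_ORDER.contains p
    · have hmem : p ∈ PHASE_ORDER := by simpa using hc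
      have hsome : (PySem.List.index? PHASE_ORDER p).isSome := by
        rw [PySem.List.index?_isSome_iff]; exact hmem
      obtain ⟨k, hk⟩ := Option.isSome_iff_exists.mp hsome
      obtain ⟨hklt, hkeq, -⟩ := PySem.List.getElem_of_index?_eq_some hk
      have hk' : List.idxOf? p PHASE_ORDER = some k := by simpa using hk
      by_cases hgt : i < (k : Int)
      · have hmax : max i (k : Int) = (k : Int) := max_eq_right hgt.le
        have hname : pvName (k : Int) = some p := by
          unfold pvName
          simp only [Int.toNat_natCast]
          rw [if_neg (by omega)]
          simp [List.getElem?_eq_getElem hklt, hkeq]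
        simp [hk', hgt, hmax, hname]
        intro h
        exact absurd hmem h
      · have hmax : max i (k : Int) = i := max_eq_left (by omega)
        simp [hk', hgt, hmax]
    · have hnone : PySem.List.index? PHASE_ORDER p = none := by
        rw [PySem.List.index?_eq_none_iff]; simpa using hc
      have hnone' : List.idxOf? p PHASE_ORDER = none := by simpa using hnone
      simp [hnone', max_eq_left (show (-1 : Int) ≤ i by omega)]
      intro h
      exact absurd h (by simpa using hc)

theorem foldA (rows : List (List (String × String))) :
    ∀ (i : Int), -1 ≤ i →
    rows.foldl pvStepA (i, pvName i)
      = (rows.foldl (fun a r => max a (pvJ r)) i,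
         pvName (rows.foldl (fun a r => max a (pvJ r)) i)) := by
  induction rows with
  | nil => intro i hi; rfl
  | cons r t ih =>
    intro i hi
    simp only [List.foldl_cons]
    rw [stepA r i hi]
    exact ih _ (le_trans hi (le_max_left _ _))

theorem A_char (rows : List (List (String × String))) :
    deepest_phase_py rows = pvName (pvM rows) := by
  unfold deepest_phase_py pvM
  have h := foldA rows (-1) (by norm_num)
  rw [show ((-1 : Int), (none : Option String)) = (-1, pvName (-1)) from rfl, h]

-- ---- B-side characterisation ----

theorem find?_reverse_eq (f : String → Bool) (l : List String) (m : Int)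
    (hub : m < (l.length : Int))
    (htrue : 0 ≤ m → ∀ v, l[m.toNat]? = some v → f v = true)
    (hfalse : ∀ (k : Nat) (v : String), l[k]? = some v → m < (k : Int) → f v = false) :
    l.reverse.find? f = if m < 0 then none else l[m.toNat]? := by
  induction l using List.reverseRecOn with
  | nil =>
    have : m < 0 := by simpa using hub
    simp [this]
  | append_singleton l x ih =>
    have hxget : (l ++ [x])[l.length]? = some x := by simp
    by_cases hm : m = (l.length : Int)
    · have h0 : 0 ≤ m := by omega
      have hmt : m.toNat = l.length := by omega
      have hfx : f x = true := htrue h0 x (by rw [hmt]; exact hxget)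
      rw [List.reverse_append, List.reverse_singleton, List.singleton_append]
      simp only [List.find?_cons, hfx]
      rw [if_neg (by omega), hmt, hxget]
    · have hmlt : m < (l.length : Int) := by
        have := hub; simp at this; omega
      have hfx : f x = false := hfalse l.length x hxget hmlt
      have htrue' : 0 ≤ m → ∀ v, l[m.toNat]? = some v → f v = true := by
        intro h0 v hv
        have hlt : m.toNat < l.length := by omega
        exact htrue h0 v (by rw [List.getElem?_append_left hlt]; exact hv)
      have hfalse' : ∀ (k : Nat) (v : String), l[k]? = some v → m < (k : Int) → f v = false := by
        intro k v hv hk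
        by_cases hkl : k < l.length
        · exact hfalse k v (by rw [List.getElem?_append_left hkl]; exact hv) hk
        · rw [List.getElem?_eq_none (by omega)] at hv; cases hv
      rw [List.reverse_append, List.reverse_singleton, List.singleton_append]
      simp only [List.find?_cons, hfx]
      rw [ih hmlt htrue' hfalse']
      by_cases hneg : m < 0
      · simp [hneg]
      · have hlt : m.toNat < l.length := by omega
        rw [if_neg hneg, if_neg hneg, List.getElem?_append_left hlt]

theorem nodup_PHASE_ORDER : PHASE_ORDER.Nodup := by decide

theorem index?_getElem (k : Nat) (v : String) (h : PHASE_ORDER[k]? = some v) :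
    PySem.List.index? PHASE_ORDER v = some k := by
  have hklt : k < PHASE_ORDER.length := by
    by_contra hc
    rw [List.getElem?_eq_none (by omega)] at h; cases h
  have hkeq : PHASE_ORDER[k] = v := by
    rw [List.getElem?_eq_getElem hklt] at h; exact Option.some.inj h
  have hmem : v ∈ PHASE_ORDER := hkeq ▸ List.getElem_mem hklt
  have hsome : (PySem.List.index? PHASE_ORDER v).isSome := by
    rw [PySem.List.index?_isSome_iff]; exact hmem
  obtain ⟨j, hj⟩ := Option.isSome_iff_exists.mp hsome
  obtain ⟨hjlt, hjeq, -⟩ := PySem.List.getElem_of_index?_eq_some hj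
  have : j = k := by
    have := nodup_PHASE_ORDER
    exact (List.Nodup.getElem_inj_iff this).mp (by rw [hjeq, hkeq])
  rw [hj, this]

theorem present_mem (rows : List (List (String × String))) (v : String) :
    (PySem.Set.contains
      (PySem.Set.ofList (rows.map (fun r => PySem.Dict.get? (PySem.Dict.mk r) "phase")))
      (some v) = true)
    ↔ ∃ r ∈ rows, PySem.Dict.get? (PySem.Dict.mk r) "phase" = some v := by
  simp [PySem.Set.contains, PySem.Set.mem_ofList, List.mem_map]

theorem B_char (rows : List (List (String × String))) :
    deepest_phase_py_alt rows = pvName (pvM rows) := by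
  unfold deepest_phase_py_alt pvName
  obtain ⟨hlb, hub⟩ := pvM_bounds rows
  refine find?_reverse_eq _ PHASE_ORDER (pvM rows) (by simp [PHASE_ORDER]; omega) ?_ ?_
  · intro h0 v hv
    rcases pvM_achieved rows with h | ⟨r, hr, he⟩
    · omega
    · rw [present_mem]
      refine ⟨r, hr, ?_⟩
      have hJ := he
      unfold pvJ at hJ
      cases hg : PySem.Dict.get? (PySem.Dict.mk r) "phase" with
      | none => rw [hg] at hJ; simp at hJ; omega
      | some p =>
        rw [hg] at hJ
        simp at hJ
        cases hidx : List.idxOf? p PHASE_ORDER with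
        | none => rw [hidx] at hJ; simp at hJ; omega
        | some k =>
          rw [hidx] at hJ
          simp at hJ
          have hidx' : PySem.List.index? PHASE_ORDER p = some k := by simpa using hidx
          obtain ⟨hklt, hkeq, -⟩ := PySem.List.getElem_of_index?_eq_some hidx'
          have hkm : k = (pvM rows).toNat := by omega
          have : v = p := by
            rw [← hkm, List.getElem?_eq_getElem hklt, hkeq] at hv
            exact (Option.some.inj hv).symm
          rw [this]
  · intro k v hv hk
    by_contra hc
    simp only [Bool.not_eq_false] at hc
    obtain ⟨r, hr, he⟩ := (present_mem rows v).mp hc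
    have hJ : pvJ r = (k : Int) := by
      unfold pvJ
      rw [he]
      have hg' : List.idxOf? v PHASE_ORDER = some k := by simpa using index?_getElem k v hv
      simp [hg']
    have := pvM_ge rows r hr
    omega

-- ===== VERDICT (by name: the statement is the Claim_ definition above) =====
theorem deepest_phase_py_spec : Claim_equal_deepest_phase_py := by
  intro rows _
  unfold Spec_deepest_phase_py
  rw [A_char, B_char]
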